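-- pv_equiv track=rewrite | github.com/Axiom-Cyber-LLC/Model-Manager-HF-Kaggle-Search | model_manager.py | split_boolean_query
-- ===== SOURCE A (Python) =====
-- def split_boolean_query(query: str) -> list[str]:
--     """Split simple Boolean OR searches into separate site-compatible queries.
--
--     Supports:
--       code OR cybersecurity OR "Threat Detection"
--       code or cybersecurity or “Threat Detection”
--       code, cybersecurity, Threat Detection
--       code | cybersecurity | Threat Detection
--       code ; cybersecurity ; Threat Detection
--
--     This intentionally treats only OR / comma / | / ; as split operators. AND/NOT are
--     not applied because HF/Kaggle search APIs do not consistently implement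
--     Boolean semantics.
--     """
--     q = query.strip().replace("“", '"').replace("”", '"').replace("’", "'")
--     if not q:
--         return []
--
--     terms: list[str] = []
--     current: list[str] = []
--     in_quote = False
--     i = 0
--
--     while i < len(q):
--         ch = q[i]
--         if ch == '"':
--             in_quote = not in_quote
--             i += 1
--             continue
--
--         if not in_quote:
--             # Split on standalone OR, case-insensitive. This avoids matching
--             # words like "forensics" or "organization".
--             if q[i:i + 2].lower() == "or":
--                 before = q[i - 1] if i > 0 else " "
--                 after = q[i + 2] if i + 2 < len(q) else " "
--                 if not before.isalnum() and not after.isalnum():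
--                     term = "".join(current).strip()
--                     if term:
--                         terms.append(term)
--                     current = []
--                     i += 2
--                     continue
--
--             if ch in {"|", ";", ","}:
--                 term = "".join(current).strip()
--                 if term:
--                     terms.append(term)
--                 current = []
--                 i += 1
--                 continue
--
--         current.append(ch)
--         i += 1
--
--     term = "".join(current).strip()
--     if term:
--         terms.append(term)
--
--     seen: set[str] = set()
--     out: list[str] = []
--     for term in terms or [q]:
--         cleaned = term.strip().strip('"').strip()
--         if cleaned and cleaned.lower() not in seen:
--             seen.add(cleaned.lower())
--             out.append(cleaned)
--     return out
-- ===== SOURCE B (Python) =====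
-- def split_boolean_query(query: str) -> list[str]:
--     """Position-scan variant: find all unquoted delimiter occurrences first,
--     slice the query at those cut points, then clean and deduplicate."""
--     q = query.strip().replace("“", '"').replace("”", '"').replace("’", "'")
--     if not q:
--         return []
--
--     n = len(q)
--     # quoted[i]: position i lies after an odd number of '"' characters
--     quoted = []
--     parity = False
--     for c in q:
--         quoted.append(parity)
--         if c == '"':
--             parity = not parity
--
--     # cut points: (start, length) of every unquoted delimiter occurrence
--     cuts = []
--     for i in range(n):
--         if quoted[i]:
--             continue
--         c = q[i]
--         if c in '|;,':
--             cuts.append((i, 1))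
--         elif q[i:i + 2].lower() == 'or':
--             before = q[i - 1] if i > 0 else ' '
--             after = q[i + 2] if i + 2 < n else ' '
--             if not before.isalnum() and not after.isalnum():
--                 cuts.append((i, 2))
--
--     # slice between cut points; drop quote chars, strip, keep non-empty
--     segments = []
--     pos = 0
--     for start, length in cuts:
--         segments.append(q[pos:start])
--         pos = start + length
--     segments.append(q[pos:])
--     terms = [t for t in (seg.replace('"', '').strip() for seg in segments) if t]
--
--     seen: set[str] = set()
--     out: list[str] = []
--     for term in terms or [q]:
--         cleaned = term.strip().strip('"').strip()
--         if cleaned and cleaned.lower() not in seen: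
--             seen.add(cleaned.lower())
--             out.append(cleaned)
--     return out
-- ===== Notes on version B (the rewrite author's own statement) =====
-- stated objective: alternative
-- what changed: A builds terms incrementally in one stateful while-loop (accumulating characters one by one and flushing on each delimiter); B instead first computes the quote-parity of every position, then collects all unquoted delimiter occurrences as (start,length) cut points, slices the normalized query at those cut points, and cleans the slices, keeping the same case-insensitive first-seen dedup.
import Mathlib
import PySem

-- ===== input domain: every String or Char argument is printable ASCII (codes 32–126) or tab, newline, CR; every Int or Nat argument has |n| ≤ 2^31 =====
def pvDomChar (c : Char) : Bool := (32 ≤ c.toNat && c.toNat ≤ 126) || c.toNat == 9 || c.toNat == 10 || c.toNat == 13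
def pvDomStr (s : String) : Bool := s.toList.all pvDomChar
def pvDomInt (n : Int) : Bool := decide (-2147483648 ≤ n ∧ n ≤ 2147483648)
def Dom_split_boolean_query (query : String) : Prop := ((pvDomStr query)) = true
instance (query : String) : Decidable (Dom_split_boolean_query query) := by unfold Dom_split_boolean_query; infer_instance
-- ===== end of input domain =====

-- B replaces A's incremental term accumulator with a position scan: it first finds every
-- unquoted delimiter occurrence, then slices the query at those cut points (objective: alternative).

-- ===== PORT A =====
-- shared preprocessing: q = query.strip().replace("“",'"').replace("”",'"').replace("’","'")
def pvNorm (query : String) : String :=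
  PySem.Str.replace (PySem.Str.replace (PySem.Str.replace (PySem.Str.strip query) "“" "\"") "”" "\"") "’" "'"

-- ch in {"|", ";", ","}
def pvIsDelim (c : Char) : Bool := c = '|' || c = ';' || c = ','

-- q[i:i+2].lower() == "or"
def pvOrAt (cs : List Char) (i : Nat) : Bool :=
  PySem.Chars.lower (PySem.List.slice cs (some (i : Int)) (some ((i : Int) + 2))) == ['o', 'r']

-- before = q[i-1] if i > 0 else " "; after = q[i+2] if i+2 < len(q) else " ";
-- not before.isalnum() and not after.isalnum()
def pvBoundary (cs : List Char) (i : Nat) : Bool :=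
  let before := if 0 < i then cs.getD (i - 1) ' ' else ' '
  let after := if i + 2 < cs.length then cs.getD (i + 2) ' ' else ' '
  !(PySem.Chars.isalnum before) && !(PySem.Chars.isalnum after)

-- term = "".join(current).strip(); if term: terms.append(term)
def pvPush (terms : List (List Char)) (current : List Char) : List (List Char) :=
  let term := PySem.Chars.strip current
  if term = [] then terms else terms ++ [term]

-- A's while loop (i < len(q)); returns the final `terms` incl. the trailing push
def pvLoopA (cs : List Char) (terms : List (List Char)) (current : List Char)
    (inq : Bool) (i : Nat) : List (List Char) :=
  if h : i < cs.length then
    let ch := cs.getD i ' '   -- q[i], exact since i < len(q)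
    if ch = '"' then
      pvLoopA cs terms current (!inq) (i + 1)
    else if !inq && (pvOrAt cs i && pvBoundary cs i) then
      pvLoopA cs (pvPush terms current) [] inq (i + 2)
    else if !inq && pvIsDelim ch then
      pvLoopA cs (pvPush terms current) [] inq (i + 1)
    else
      pvLoopA cs terms (current ++ [ch]) inq (i + 1)
  else pvPush terms current
termination_by cs.length - i

-- final dedup loop, identical source lines in Source A and Source B:
-- for term in terms or [q]: cleaned = term.strip().strip('"').strip(); seen/out
def pvDedup (fallback : List Char) (terms : List (List Char)) : List String :=
  let src := if terms = [] then [fallback] else terms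
  (src.foldl (fun (st : PySem.Set (List Char) × List String) term =>
      let cleaned := PySem.Chars.strip (PySem.Chars.stripChars (PySem.Chars.strip term) ['"'])
      if !cleaned.isEmpty && !(PySem.Set.contains st.1 (PySem.Chars.lower cleaned)) then
        (PySem.Set.add st.1 (PySem.Chars.lower cleaned), st.2 ++ [String.ofList cleaned])
      else st) (PySem.Set.empty, [])).2

def split_boolean_query (query : String) : List String :=
  let q := pvNorm query
  if q = "" then []
  else pvDedup q.toList (pvLoopA q.toList [] [] false 0)

-- ===== PORT B =====
-- quoted[i]: parity of '"' characters strictly before position i, built in one pass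
def pvQuoted (cs : List Char) : List Bool :=
  (cs.foldl (fun (st : List Bool × Bool) c =>
      (st.1 ++ [st.2], if c = '"' then !st.2 else st.2)) ([], false)).1

-- cuts: every unquoted delimiter occurrence, as (start, length)
def pvCuts (cs : List Char) : List (Nat × Nat) :=
  let quoted := pvQuoted cs
  (List.range cs.length).foldl (fun acc i =>
      if quoted.getD i false then acc
      else
        let c := cs.getD i ' '   -- q[i], exact since i < len(q)
        if pvIsDelim c then acc ++ [(i, 1)]
        else if pvOrAt cs i then
          if pvBoundary cs i then acc ++ [(i, 2)] else acc
        else acc) []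

-- slice q between consecutive cut points
def pvSegments (cs : List Char) (cuts : List (Nat × Nat)) : List (List Char) :=
  let st := cuts.foldl (fun (st : List (List Char) × Nat) cut =>
      (st.1 ++ [PySem.List.slice cs (some (st.2 : Int)) (some (cut.1 : Int))], cut.1 + cut.2))
      ([], 0)
  st.1 ++ [PySem.List.slice cs (some (st.2 : Int)) none]

def split_boolean_query_alt (query : String) : List String :=
  let q := pvNorm query
  if q = "" then []
  else
    let cs := q.toList
    let segments := pvSegments cs (pvCuts cs)
    let terms := (segments.map (fun seg =>
        PySem.Chars.strip (PySem.Chars.replace seg ['"'] []))).filter (fun t => !t.isEmpty)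
    pvDedup cs terms

-- ===== PRECONDITION & SPEC =====
def Spec_split_boolean_query (query : String) (out : List String) : Prop := out = split_boolean_query_alt query
instance (query : String) (out : List String) : Decidable (Spec_split_boolean_query query out) := by unfold Spec_split_boolean_query; infer_instance

-- ===== CLAIM (what is proved, stated in full; the proofs are below) =====
def Claim_equal_split_boolean_query : Prop := ∀ (query : String), Dom_split_boolean_query query → Spec_split_boolean_query query (split_boolean_query query)

-- ===== LEMMAS AND PROOFS =====

-- proof-side characterisations
def pb (u : List Char) : Bool := (u.count '\"') % 2 == 1

def qpar (cs : List Char) (i : Nat) : Bool := pb (cs.take i)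

def cutA (cs : List Char) (i : Nat) : Option (Nat × Nat) :=
  if qpar cs i then none
  else if pvIsDelim (cs.getD i ' ') then some (i, 1)
  else if pvOrAt cs i && pvBoundary cs i then some (i, 2)
  else none

def cutsGe (cs : List Char) (i : Nat) : List (Nat × Nat) :=
  if h : i < cs.length then
    match cutA cs i with
    | some c => c :: cutsGe cs (i + 1)
    | none => cutsGe cs (i + 1)
  else []
termination_by cs.length - i

def segsOf (cs : List Char) (pos : Nat) : List (Nat × Nat) → List (List Char)
  | [] => [cs.drop pos]
  | (s, l) :: rest => (cs.drop pos).take (s - pos) :: segsOf cs (s + l) rest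

def cleanTerms (segs : List (List Char)) : List (List Char) :=
  (segs.map (fun seg => PySem.Chars.strip (seg.filter (· ≠ '\"')))).filter (fun t => !t.isEmpty)

-- str.replace(x, '\"', '') is filtering out the quote characters
lemma go_quote (fuel : Nat) : ∀ (l acc : List Char), l.length ≤ fuel →
    PySem.Chars.replace.go ['\"'] [] fuel l acc = acc.reverse ++ l.filter (· ≠ '\"') := by
  induction fuel with
  | zero => intro l acc h; simp at h; simp [h, PySem.Chars.replace.go]
  | succ n ih =>
    intro l acc h
    match l with
    | [] => simp [PySem.Chars.replace.go]
    | c :: t =>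
      rw [PySem.Chars.replace.go]
      by_cases hc : c = '\"'
      · subst hc
        simp only [List.isPrefixOf, Bool.and_true, beq_self_eq_true, if_pos]
        rw [ih _ _ (by simpa using h)]
        simp
      · have hp : (('\"' == c) && true) = false := by
          simp; exact fun e => hc e.symm
        simp only [List.isPrefixOf, hp, Bool.false_eq_true, if_false]
        rw [ih t (c :: acc) (by simpa using h)]
        simp [hc]

lemma replace_quote_eq_filter (s : List Char) :
    PySem.Chars.replace s ['\"'] [] = s.filter (· ≠ '\"') := by
  unfold PySem.Chars.replace
  rw [if_neg (by simp)]
  exact go_quote s.length s [] le_rfl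

lemma pb_cons (c : Char) (u : List Char) : pb (c :: u) = ((decide (c = '\"')) ^^ pb u) := by
  unfold pb
  by_cases hc : c = '\"'
  · subst hc
    simp only [List.count_cons, beq_self_eq_true, if_pos, decide_true]
    rcases Nat.mod_two_eq_zero_or_one (u.count '\"') with h | h <;>
      simp [Nat.add_mod, h]
  · have hb : ('\"' == c) = false := by simpa using fun e => hc e.symm
    simp [List.count_cons, hb, hc]

lemma pb_nil : pb [] = false := rfl

-- the one-pass parity fold of port B
lemma quoted_fold (cs : List Char) : ∀ (l : List Bool) (b : Bool),
    cs.foldl (fun (st : List Bool × Bool) c =>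
      (st.1 ++ [st.2], if c = '\"' then !st.2 else st.2)) (l, b)
    = (l ++ (List.range cs.length).map (fun i => b ^^ pb (cs.take i)), b ^^ pb cs) := by
  induction cs with
  | nil => intro l b; simp [pb]
  | cons c t ih =>
    intro l b
    rw [List.foldl_cons]
    simp only
    rw [ih]
    have hb' : (if c = '\"' then !b else b) = (b ^^ decide (c = '\"')) := by
      by_cases hc : c = '\"' <;> simp [hc]
    rw [hb', List.length_cons, List.range_succ_eq_map]
    simp [List.map_map, Function.comp_def, List.take_succ_cons, pb_cons, Bool.xor_assoc, pb_nil]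

lemma pvQuoted_getD (cs : List Char) (i : Nat) (h : i < cs.length) :
    (pvQuoted cs).getD i false = qpar cs i := by
  unfold pvQuoted
  rw [quoted_fold]
  simp only [List.nil_append]
  rw [List.getD_eq_getElem?_getD]
  simp [List.getElem?_map, List.getElem?_range, h, qpar, pb]

-- the cuts loop of port B is a filterMap of cutA
lemma pvCuts_eq (cs : List Char) :
    pvCuts cs = (List.range cs.length).filterMap (cutA cs) := by
  unfold pvCuts
  rw [PySem.List.foldl_congr_mem _ _ (fun acc i => acc ++ (cutA cs i).toList) _ ?_]
  · rw [PySem.List.foldl_append_eq_flatMap]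
    exact congrArg _ (List.filterMap_eq_flatMap_toList (cutA cs) (List.range cs.length)).symm
  · intro acc i hi
    have hlt : i < cs.length := List.mem_range.mp hi
    rw [pvQuoted_getD cs i hlt]
    unfold cutA
    beta_reduce
    by_cases hq : qpar cs i
    · rw [if_pos hq, if_pos hq]; simp
    · rw [if_neg hq, if_neg hq]
      by_cases hd : pvIsDelim (cs.getD i ' ')
      · rw [if_pos hd, if_pos hd]; simp
      · rw [if_neg hd, if_neg hd]
        by_cases ho : pvOrAt cs i
        · rw [if_pos ho]
          by_cases hb : pvBoundary cs i
          · rw [if_pos hb, if_pos (by rw [ho, hb]; rfl)]; simp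
          · rw [if_neg hb, if_neg (by simp [ho, hb])]; simp
        · rw [if_neg ho, if_neg (by simp [ho])]; simp

lemma cutsGe_zero (cs : List Char) :
    cutsGe cs 0 = (List.range cs.length).filterMap (cutA cs) := by
  suffices h : ∀ k i, cs.length - i ≤ k →
      cutsGe cs i = ((List.range cs.length).drop i).filterMap (cutA cs) by
    simpa using h cs.length 0 (by omega)
  intro k
  induction k with
  | zero =>
    intro i hi
    rw [cutsGe, dif_neg (by omega), List.drop_of_length_le (by simpa using by omega)]
    rfl
  | succ n ih =>
    intro i hi
    rw [cutsGe]
    by_cases h : i < cs.length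
    · rw [dif_pos h]
      have hdrop : (List.range cs.length).drop i = i :: (List.range cs.length).drop (i + 1) := by
        apply List.ext_getElem
        · simp; omega
        · intro k h1 h2
          rcases k with _ | k <;> simp [List.getElem_drop, List.getElem_range] <;> omega
      rw [hdrop, List.filterMap_cons]
      cases hc : cutA cs i <;> simp [hc, ih (i + 1) (by omega)]
    · rw [dif_neg h, List.drop_of_length_le (by simpa using by omega)]
      rfl

-- the segments loop of port B computes segsOf
lemma pvSegments_eq (cs : List Char) (cuts : List (Nat × Nat)) :
    pvSegments cs cuts = segsOf cs 0 cuts := by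
  suffices h : ∀ (cuts : List (Nat × Nat)) (acc : List (List Char)) (pos : Nat),
      (let st := cuts.foldl (fun (st : List (List Char) × Nat) cut =>
        (st.1 ++ [PySem.List.slice cs (some (st.2 : Int)) (some (cut.1 : Int))], cut.1 + cut.2))
        (acc, pos)
      st.1 ++ [PySem.List.slice cs (some (st.2 : Int)) none]) = acc ++ segsOf cs pos cuts by
    exact h cuts [] 0
  intro cuts
  induction cuts with
  | nil =>
    intro acc pos
    simp [segsOf, PySem.List.slice_from_natCast]
  | cons cut rest ih =>
    intro acc pos
    rw [List.foldl_cons]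
    simp only
    rw [ih]
    cases cut with
    | mk s l => simp [segsOf, PySem.List.slice_natCast]

-- the main loop invariant
lemma pb_append_singleton (u : List Char) (c : Char) :
    pb (u ++ [c]) = (pb u ^^ decide (c = '\"')) := by
  unfold pb
  rw [List.count_append]
  by_cases hc : c = '\"'
  · subst hc
    simp only [List.count_singleton, beq_self_eq_true, if_pos, decide_true]
    rcases Nat.mod_two_eq_zero_or_one (u.count '\"') with h | h <;>
      simp [Nat.add_mod, h]
  · have hb : ('\"' == c) = false := by simpa using fun e => hc e.symm
    simp [List.count_singleton, hb, hc]

lemma qpar_succ (cs : List Char) (i : Nat) (h : i < cs.length) :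
    qpar cs (i + 1) = (if cs.getD i ' ' = '\"' then !qpar cs i else qpar cs i) := by
  unfold qpar
  rw [List.take_succ, List.getElem?_eq_getElem h]
  have hg : cs.getD i ' ' = cs[i] := by
    rw [List.getD_eq_getElem?_getD, List.getElem?_eq_getElem h]; rfl
  rw [hg]
  simp only [Option.toList_some]
  rw [pb_append_singleton]
  by_cases hc : cs[i] = '\"' <;> simp [hc]

lemma orAt_spec (cs : List Char) (i : Nat) (h : pvOrAt cs i = true) :
    i + 2 ≤ cs.length ∧ PySem.Chars.lowerChar (cs.getD i ' ') = 'o'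
      ∧ PySem.Chars.lowerChar (cs.getD (i + 1) ' ') = 'r' := by
  unfold pvOrAt at h
  have hcast : ((i : Int) + 2) = (((i + 2 : Nat) : Int)) := by push_cast; ring
  rw [hcast, PySem.List.slice_natCast, show i + 2 - i = 2 by omega, beq_iff_eq] at h
  unfold PySem.Chars.lower at h
  match hd : cs.drop i with
  | [] => rw [hd] at h; simp at h
  | [a] => rw [hd] at h; simp at h
  | a :: b :: t2 =>
    rw [hd] at h
    simp only [List.take_succ_cons, List.take_zero, List.map_cons, List.map_nil,
      List.cons.injEq, and_true] at h
    have hlen : cs.length - i = t2.length + 2 := by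
      have := congrArg List.length hd; simpa using this
    have hi : i + 2 ≤ cs.length := by
      by_cases hle : i ≤ cs.length
      · omega
      · exfalso; rw [List.drop_of_length_le (by omega)] at hd; simp at hd
    have ha : cs.getD i ' ' = a := by
      rw [List.getD_eq_getElem?_getD, show (cs[i]? = some a) from ?_]
      · rfl
      · have : (cs.drop i)[0]? = cs[i + 0]? := List.getElem?_drop
        rw [hd] at this; simpa using this.symm
    have hb : cs.getD (i + 1) ' ' = b := by
      rw [List.getD_eq_getElem?_getD, show (cs[i+1]? = some b) from ?_]
      · rfl
      · have : (cs.drop i)[1]? = cs[i + 1]? := List.getElem?_drop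
        rw [hd] at this; simpa using this.symm
    exact ⟨hi, by rw [ha]; exact h.1, by rw [hb]; exact h.2⟩

lemma delim_lower_ne_o {c : Char} (hd : pvIsDelim c = true) : PySem.Chars.lowerChar c ≠ 'o' := by
  unfold pvIsDelim at hd; simp at hd
  rcases hd with (h | h) | h <;> subst h <;> decide

lemma delim_lower_ne_r {c : Char} (hd : pvIsDelim c = true) : PySem.Chars.lowerChar c ≠ 'r' := by
  unfold pvIsDelim at hd; simp at hd
  rcases hd with (h | h) | h <;> subst h <;> decide

lemma take_ext (cs : List Char) (i pos : Nat) (h1 : pos ≤ i) (h2 : i < cs.length) :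
    (cs.drop pos).take (i + 1 - pos) = (cs.drop pos).take (i - pos) ++ [cs.getD i ' '] := by
  rw [show i + 1 - pos = (i - pos) + 1 by omega, List.take_succ]
  congr 1
  have hg : (cs.drop pos)[i - pos]? = some cs[i] := by
    rw [List.getElem?_drop, show pos + (i - pos) = i by omega]
    exact List.getElem?_eq_getElem h2
  rw [hg, List.getD_eq_getElem?_getD, List.getElem?_eq_getElem h2]
  rfl

lemma cutsGe_eq_cons {cs : List Char} {i : Nat} {c : Nat × Nat} (h : i < cs.length)
    (hc : cutA cs i = some c) : cutsGe cs i = c :: cutsGe cs (i + 1) := by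
  rw [cutsGe, dif_pos h, hc]

lemma cutsGe_eq_skip {cs : List Char} {i : Nat} (h : i < cs.length)
    (hc : cutA cs i = none) : cutsGe cs i = cutsGe cs (i + 1) := by
  rw [cutsGe, dif_pos h, hc]

lemma push_cons (terms : List (List Char)) (seg : List Char) (rest : List (List Char)) :
    pvPush terms (seg.filter (· ≠ '\"')) ++ cleanTerms rest = terms ++ cleanTerms (seg :: rest) := by
  unfold pvPush cleanTerms
  simp only [List.map_cons, List.filter_cons]
  by_cases he : PySem.Chars.strip (List.filter (fun x => !decide (x = '\"')) seg) = [] <;>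
    simp [he]

lemma loop_inv (cs : List Char) : ∀ (fuel i pos : Nat) (terms : List (List Char))
    (current : List Char) (inq : Bool),
    cs.length - i ≤ fuel → pos ≤ i →
    current = ((cs.drop pos).take (i - pos)).filter (· ≠ '\"') →
    inq = qpar cs i →
    pvLoopA cs terms current inq i = terms ++ cleanTerms (segsOf cs pos (cutsGe cs i)) := by
  intro fuel
  induction fuel with
  | zero =>
    intro i pos terms current inq hf hpos hcur hinq
    have hterm : ¬ i < cs.length := by omega
    rw [pvLoopA, dif_neg hterm, cutsGe, dif_neg hterm]
    rw [hcur, List.take_of_length_le (by simp; omega)]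
    unfold pvPush cleanTerms
    simp only [segsOf, List.map_cons, List.map_nil, List.filter_cons, List.filter_nil]
    by_cases he : PySem.Chars.strip (List.filter (fun x => !decide (x = '\"')) (cs.drop pos)) = [] <;> simp [he]
  | succ n ih =>
    intro i pos terms current inq hf hpos hcur hinq
    by_cases h : i < cs.length
    case neg =>
      rw [pvLoopA, dif_neg h, cutsGe, dif_neg h]
      rw [hcur, List.take_of_length_le (by simp; omega)]
      unfold pvPush cleanTerms
      simp only [segsOf, List.map_cons, List.map_nil, List.filter_cons, List.filter_nil]
      by_cases he : PySem.Chars.strip (List.filter (fun x => !decide (x = '\"')) (cs.drop pos)) = [] <;> simp [he]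
    case pos =>
    rw [pvLoopA, dif_pos h]
    simp only
    by_cases hch : cs.getD i ' ' = '\"'
    · -- quote character: toggle, no cut at i
      rw [if_pos hch]
      have hcutA : cutA cs i = none := by
        unfold cutA
        by_cases hq : qpar cs i
        · rw [if_pos hq]
        · have hdel : pvIsDelim (cs.getD i ' ') = false := by rw [hch]; decide
          have hor : (pvOrAt cs i && pvBoundary cs i) = false := by
            cases hOr : pvOrAt cs i
            · simp
            · exfalso
              have := (orAt_spec cs i hOr).2.1
              rw [hch] at this
              exact absurd this (by decide)
          rw [if_neg hq, if_neg (by rw [hdel]; simp), if_neg (by rw [hor]; simp)]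
      rw [cutsGe_eq_skip h hcutA]
      exact ih (i + 1) pos terms current (!inq) (by omega) (by omega)
        (by rw [take_ext cs i pos hpos h, hch, List.filter_append, hcur]; simp)
        (by rw [qpar_succ cs i h, if_pos hch, hinq])
    · rw [if_neg hch]
      by_cases m2 : (!inq && (pvOrAt cs i && pvBoundary cs i)) = true
      · -- standalone OR: cut of length 2
        rw [if_pos m2]
        simp only [Bool.and_eq_true, Bool.not_eq_eq_eq_not, Bool.not_true] at m2
        obtain ⟨hinq0, ho, hb⟩ := m2
        obtain ⟨hlen2, hlo, hlr⟩ := orAt_spec cs i ho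
        have hq : qpar cs i = false := by rw [← hinq, hinq0]
        have hcutA : cutA cs i = some (i, 2) := by
          unfold cutA
          have hdel : pvIsDelim (cs.getD i ' ') = false := by
            cases hd : pvIsDelim (cs.getD i ' ')
            · rfl
            · exact absurd hlo (delim_lower_ne_o hd)
          rw [if_neg (by simp [hq]), if_neg (by rw [hdel]; simp), if_pos (by simp [ho, hb])]
        have h1 : i + 1 < cs.length := by omega
        have hq1 : cs.getD (i + 1) ' ' ≠ '\"' := by
          intro e; rw [e] at hlr; exact absurd hlr (by decide)
        have hcutA1 : cutA cs (i + 1) = none := by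
          unfold cutA
          by_cases hq' : qpar cs (i + 1)
          · rw [if_pos hq']
          · have hdel1 : pvIsDelim (cs.getD (i + 1) ' ') = false := by
              cases hd : pvIsDelim (cs.getD (i + 1) ' ')
              · rfl
              · exact absurd hlr (delim_lower_ne_r hd)
            have hor1 : pvOrAt cs (i + 1) = false := by
              cases ho1 : pvOrAt cs (i + 1)
              · rfl
              · exfalso
                have := (orAt_spec cs (i + 1) ho1).2.1
                rw [this] at hlr
                exact absurd hlr (by decide)
            rw [if_neg hq', if_neg (by rw [hdel1]; simp), if_neg (by rw [hor1]; simp)]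
        rw [cutsGe_eq_cons h hcutA, cutsGe_eq_skip h1 hcutA1]
        have hq2 : qpar cs (i + 2) = false := by
          rw [show i + 2 = (i + 1) + 1 by omega, qpar_succ cs (i + 1) h1, if_neg hq1,
            qpar_succ cs i h, if_neg hch, hq]
        rw [ih (i + 2) (i + 2) (pvPush terms current) [] inq (by omega) le_rfl
          (by simp) (by rw [hinq0, hq2])]
        simp only [segsOf]
        rw [hcur]
        exact push_cons terms _ _
      · rw [if_neg m2]
        by_cases m3 : (!inq && pvIsDelim (cs.getD i ' ')) = true
        · -- single-character delimiter: cut of length 1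
          rw [if_pos m3]
          simp only [Bool.and_eq_true, Bool.not_eq_eq_eq_not, Bool.not_true] at m3
          obtain ⟨hinq0, hd⟩ := m3
          have hq : qpar cs i = false := by rw [← hinq, hinq0]
          have hcutA : cutA cs i = some (i, 1) := by
            unfold cutA
            rw [if_neg (by simp [hq]), if_pos hd]
          rw [cutsGe_eq_cons h hcutA]
          have hq1 : qpar cs (i + 1) = false := by
            rw [qpar_succ cs i h, if_neg hch, hq]
          rw [ih (i + 1) (i + 1) (pvPush terms current) [] inq (by omega) le_rfl
            (by simp) (by rw [hinq0, hq1])]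
          simp only [segsOf]
          rw [hcur]
          exact push_cons terms _ _
        · -- ordinary character: append to current
          rw [if_neg m3]
          have hcutA : cutA cs i = none := by
            unfold cutA
            by_cases hq : qpar cs i
            · rw [if_pos hq]
            · have hinq0 : inq = false := by rw [hinq]; simpa using hq
              have hdel : pvIsDelim (cs.getD i ' ') = false := by
                cases hd : pvIsDelim (cs.getD i ' ')
                · rfl
                · exact absurd (show (!inq && pvIsDelim (cs.getD i ' ')) = true by rw [hinq0, hd]; rfl) m3
              have hor : (pvOrAt cs i && pvBoundary cs i) = false := by
                cases hob : (pvOrAt cs i && pvBoundary cs i)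
                · rfl
                · exact absurd (show (!inq && (pvOrAt cs i && pvBoundary cs i)) = true by rw [hinq0, hob]; rfl) m2
              rw [if_neg hq, if_neg (by rw [hdel]; simp), if_neg (by rw [hor]; simp)]
          rw [cutsGe_eq_skip h hcutA]
          exact ih (i + 1) pos terms (current ++ [cs.getD i ' ']) inq (by omega) (by omega)
            (by
              have hch' : cs[i]?.getD ' ' ≠ '\"' := by
                rw [← List.getD_eq_getElem?_getD]; exact hch
              rw [take_ext cs i pos hpos h, List.filter_append, hcur]
              simp [hch', List.getD_eq_getElem?_getD])
            (by rw [qpar_succ cs i h, if_neg hch, hinq])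

lemma terms_eq (cs : List Char) :
    pvLoopA cs [] [] false 0
      = ((pvSegments cs (pvCuts cs)).map (fun seg =>
          PySem.Chars.strip (PySem.Chars.replace seg ['\"'] []))).filter (fun t => !t.isEmpty) := by
  have h := loop_inv cs cs.length 0 0 [] [] false (by omega) le_rfl (by simp) rfl
  rw [h, pvSegments_eq, pvCuts_eq, ← cutsGe_zero]
  simp [cleanTerms, replace_quote_eq_filter]

-- ===== VERDICT (by name: the statement is the Claim_ definition above) =====
theorem split_boolean_query_spec : Claim_equal_split_boolean_query := by
  intro query _
  unfold Spec_split_boolean_query split_boolean_query split_boolean_query_alt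
  by_cases h : pvNorm query = ""
  · simp [h]
  · simp only [h, if_neg h]
    rw [terms_eq]
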